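-- pv_equiv track=rewrite | github.com/Ascend/MindSpeed | mindspeed/core/qos/domain_info.py | generate_masked_orthogonal_rank_groups
-- ===== SOURCE A (Python) =====
-- from typing import (
--     Optional,
--     Callable,
--     List
-- )
--
-- def generate_masked_orthogonal_rank_groups(
--         world_size: int, parallel_size: List[int],
--         mask: List[bool]) -> List[List[int]]:
--     def prefix_product(a: List[int], init=1) -> List[int]:
--         r = [init]
--         for v in a:
--             init = init * v
--             r.append(init)
--         return r
--
--     def inner_product(a: List[int], b: List[int]) -> int:
--         return sum([x * y for x, y in zip(a, b)])
--
--     def decompose(index, shape, stride=None):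
--         '''
--         This function solve the math problem below:
--             There is an equation:
--                 index = sum(idx[i] * stride[i])
--             And given the value of index, stride.
--             Return the idx.
--         This function will used to get the pp/dp/pp_rank
--         from group_index and rank_in_group.
--         '''
--         if stride is None:
--             stride = prefix_product(shape)
--         idx = [(index // d) % s for s, d in zip(shape, stride)]
--         # stride is a prefix_product result. And the value of stride[-1]
--         # is not used.
--         idx_stride_sum = sum([x * y for x, y in zip(idx, stride[:-1])])
--         if idx_stride_sum != index:
--             raise ValueError(
--                 "idx {} with shape {} mismatch the return idx {}".format(
--                     index, shape, idx
--                 )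
--             )
--         return idx
--
--     masked_shape = [s for s, m in zip(parallel_size, mask) if m]
--     unmasked_shape = [s for s, m in zip(parallel_size, mask) if not m]
--
--     global_stride = prefix_product(parallel_size)
--     masked_stride = [d for d, m in zip(global_stride, mask) if m]
--     unmasked_stride = [d for d, m in zip(global_stride, mask) if not m]
--
--     group_size = prefix_product(masked_shape)[-1]
--     num_of_group = world_size // group_size
--
--     ranks = []
--     for group_index in range(num_of_group):
--         # get indices from unmaksed for group_index.
--         decomposed_group_idx = decompose(group_index, unmasked_shape)
--         rank = []
--         for rank_in_group in range(group_size):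
--             # get indices from masked for rank_in_group.
--             decomposed_rank_idx = decompose(rank_in_group, masked_shape)
--             rank.append(
--                 inner_product(decomposed_rank_idx, masked_stride) +
--                 inner_product(decomposed_group_idx, unmasked_stride))
--         ranks.append(rank)
--     return ranks
-- ===== SOURCE B (Python) =====
-- def generate_masked_orthogonal_rank_groups(world_size, parallel_size, mask):
--     # Split the dimensions into masked/unmasked (size, global stride) pairs.
--     masked = []
--     unmasked = []
--     stride = 1
--     for s, m in zip(parallel_size, mask):
--         (masked if m else unmasked).append((s, stride))
--         stride *= s
--     group_size = 1
--     for s, _ in masked: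
--         group_size *= s
--     num_of_group = world_size // group_size
--     if num_of_group <= 0:
--         return []
--     # Build all in-group rank offsets by Cartesian-product expansion: each
--     # dimension multiplies the current offset list by its size, adding j*stride.
--     # No index is ever decomposed: offsets are produced directly in index order.
--     rank_offsets = [0]
--     for s, st in masked:
--         rank_offsets = [o + j * st for j in range(s) for o in rank_offsets]
--     # Same expansion over the unmasked dimensions, keeping only the first
--     # num_of_group offsets at each step (only that many groups are requested).
--     group_offsets = [0]
--     for s, st in unmasked:
--         group_offsets = [o + j * st for j in range(s) for o in group_offsets][:num_of_group]
--     return [[g + r for r in rank_offsets] for g in group_offsets]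
-- ===== Notes on version B (the rewrite author's own statement) =====
-- stated objective: alternative
-- what changed: B never decomposes an index: it builds the masked and unmasked offset lists by Cartesian-product expansion (each dimension multiplies the current offset list by its size, appending j*stride, truncating the group list to the num_of_group offsets requested) and fills the grid with single additions, instead of A's per-cell mixed-radix decompose plus two inner products.
-- outside the precondition, e.g. on generate_masked_orthogonal_rank_groups(1, [-2], [False]): A returns [[0]], B returns []; on generate_masked_orthogonal_rank_groups(2, [2], [True, True]): A returns [[0, 1]], B returns [[0, 1]]
import Mathlib
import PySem

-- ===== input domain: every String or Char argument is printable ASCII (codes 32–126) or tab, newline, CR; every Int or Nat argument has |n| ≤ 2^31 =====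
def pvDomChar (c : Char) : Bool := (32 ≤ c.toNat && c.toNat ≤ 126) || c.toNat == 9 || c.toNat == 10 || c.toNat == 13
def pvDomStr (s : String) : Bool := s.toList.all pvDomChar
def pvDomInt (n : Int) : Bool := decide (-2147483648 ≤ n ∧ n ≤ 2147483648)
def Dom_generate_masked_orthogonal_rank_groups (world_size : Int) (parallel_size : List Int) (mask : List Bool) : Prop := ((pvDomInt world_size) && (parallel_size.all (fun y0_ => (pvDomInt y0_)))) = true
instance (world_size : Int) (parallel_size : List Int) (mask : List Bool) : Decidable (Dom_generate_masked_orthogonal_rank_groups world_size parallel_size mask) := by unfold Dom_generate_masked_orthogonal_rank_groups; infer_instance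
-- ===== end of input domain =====

-- B builds the offset lists by Cartesian-product expansion over the dimensions
-- (each dimension multiplies the current offset list by its size) instead of
-- decomposing every index by repeated division; objective: alternative.

-- ===== PORT A =====
def pvA_prefix_product (a : List Int) (init : Int) : List Int :=
  (a.foldl (fun (st : List Int × Int) v => (st.1 ++ [st.2 * v], st.2 * v)) ([init], init)).1

-- sum([x * y for x, y in zip(a, b)]) (List.sum over Int agrees with Python's left fold)
def pvA_inner_product (a b : List Int) : Int :=
  ((a.zip b).map (fun p => p.1 * p.2)).sum

def pvA_decompose (index : Int) (shape : List Int) : List Int :=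
  let stride := pvA_prefix_product shape 1
  let idx := (shape.zip stride).map (fun sd => PySem.Int.mod (PySem.Int.floordiv index sd.2) sd.1)
  let idx_stride_sum := ((idx.zip stride.dropLast).map (fun p => p.1 * p.2)).sum
  if idx_stride_sum ≠ index then []   -- raise ValueError: unreachable for inputs admitted by Pre_
  else idx

def generate_masked_orthogonal_rank_groups (world_size : Int) (parallel_size : List Int) (mask : List Bool) : List (List Int) :=
  let masked_shape := ((parallel_size.zip mask).filter (fun p => p.2)).map (fun p => p.1)
  let unmasked_shape := ((parallel_size.zip mask).filter (fun p => !p.2)).map (fun p => p.1)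
  let global_stride := pvA_prefix_product parallel_size 1
  let masked_stride := ((global_stride.zip mask).filter (fun p => p.2)).map (fun p => p.1)
  let unmasked_stride := ((global_stride.zip mask).filter (fun p => !p.2)).map (fun p => p.1)
  let group_size := (pvA_prefix_product masked_shape 1).getLastD 0   -- [-1]; the list is never empty
  let num_of_group := PySem.Int.floordiv world_size group_size       -- ZeroDivisionError when 0: excluded by Pre_
  (PySem.List.pyRange 0 num_of_group 1).foldl (fun ranks group_index =>
    let decomposed_group_idx := pvA_decompose group_index unmasked_shape
    let rank := (PySem.List.pyRange 0 group_size 1).foldl (fun rank rank_in_group =>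
      rank ++ [pvA_inner_product (pvA_decompose rank_in_group masked_shape) masked_stride
               + pvA_inner_product decomposed_group_idx unmasked_stride]) ([] : List Int)
    ranks ++ [rank]) ([] : List (List Int))

-- ===== PORT B =====
-- the one-pass split into masked/unmasked (size, stride) pairs of Source B
def pvB_dims (parallel_size : List Int) (mask : List Bool) :
    List (Int × Int) × List (Int × Int) × Int :=
  (parallel_size.zip mask).foldl (fun (st : List (Int × Int) × List (Int × Int) × Int) p =>
    if p.2 then (st.1 ++ [(p.1, st.2.2)], st.2.1, st.2.2 * p.1)
    else (st.1, st.2.1 ++ [(p.1, st.2.2)], st.2.2 * p.1)) ([], [], 1)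

-- one expansion step: [o + j * st for j in range(s) for o in offs]
def pvB_level (offs : List Int) (d : Int × Int) : List Int :=
  (PySem.List.pyRange 0 d.1 1).flatMap (fun j => offs.map (fun o => o + j * d.2))

def generate_masked_orthogonal_rank_groups_alt (world_size : Int) (parallel_size : List Int) (mask : List Bool) : List (List Int) :=
  let t := pvB_dims parallel_size mask
  let group_size := t.1.foldl (fun a d => a * d.1) 1
  let num_of_group := PySem.Int.floordiv world_size group_size
  if num_of_group ≤ 0 then []
  else
    let rank_offsets := t.1.foldl pvB_level [0]
    -- [:num_of_group] with num_of_group > 0 is List.take num_of_group.toNat (exact there)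
    let group_offsets := t.2.1.foldl (fun offs d => (pvB_level offs d).take num_of_group.toNat) [0]
    group_offsets.map (fun g => rank_offsets.map (fun r => g + r))

-- ===== PRECONDITION & SPEC =====
-- product of the masked sizes (= A's group_size) / of the unmasked sizes
def pvMaskedProd (parallel_size : List Int) (mask : List Bool) : Int :=
  ((((parallel_size.zip mask).filter (fun p => p.2)).map (fun p => p.1))).prod
def pvUnmaskedProd (parallel_size : List Int) (mask : List Bool) : Int :=
  ((((parallel_size.zip mask).filter (fun p => !p.2)).map (fun p => p.1))).prod

-- Pre_ excludes (i) a zero masked product (A raises ZeroDivisionError) and, when any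
-- group is actually generated, (ii) non-positive dimension sizes, a length mismatch
-- between parallel_size and mask, and more groups than the unmasked space holds — on
-- those A's decompose either raises ValueError/ZeroDivisionError or returns only by
-- accident of its stride arithmetic.
def Pre_generate_masked_orthogonal_rank_groups (world_size : Int) (parallel_size : List Int) (mask : List Bool) : Prop :=
  pvMaskedProd parallel_size mask ≠ 0 ∧
  (PySem.Int.floordiv world_size (pvMaskedProd parallel_size mask) ≤ 0 ∨
   (mask.length = parallel_size.length ∧ (∀ s ∈ parallel_size, 1 ≤ s) ∧
    PySem.Int.floordiv world_size (pvMaskedProd parallel_size mask) ≤ pvUnmaskedProd parallel_size mask))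
instance (world_size : Int) (parallel_size : List Int) (mask : List Bool) : Decidable (Pre_generate_masked_orthogonal_rank_groups world_size parallel_size mask) := by unfold Pre_generate_masked_orthogonal_rank_groups; infer_instance

def pvWitness_generate_masked_orthogonal_rank_groups : Int × List Int × List Bool :=
  (24, [2, 3, 4], [true, false, true])

def Spec_generate_masked_orthogonal_rank_groups (world_size : Int) (parallel_size : List Int) (mask : List Bool) (out : List (List Int)) : Prop := out = generate_masked_orthogonal_rank_groups_alt world_size parallel_size mask
instance (world_size : Int) (parallel_size : List Int) (mask : List Bool) (out : List (List Int)) : Decidable (Spec_generate_masked_orthogonal_rank_groups world_size parallel_size mask out) := by unfold Spec_generate_masked_orthogonal_rank_groups; infer_instance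

-- ===== CLAIM (what is proved, stated in full; the proofs are below) =====
def Claim_equal_generate_masked_orthogonal_rank_groups : Prop := ∀ (world_size : Int) (parallel_size : List Int) (mask : List Bool), Dom_generate_masked_orthogonal_rank_groups world_size parallel_size mask → Pre_generate_masked_orthogonal_rank_groups world_size parallel_size mask → Spec_generate_masked_orthogonal_rank_groups world_size parallel_size mask (generate_masked_orthogonal_rank_groups world_size parallel_size mask)

-- ===== LEMMAS AND PROOFS =====

def pvPrefixes (init : Int) : List Int → List Int
  | [] => [init]
  | v :: vs => init :: pvPrefixes (init * v) vs

def pvDims (c : Int) : List (Int × Bool) → List (Int × Int) × List (Int × Int)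
  | [] => ([], [])
  | p :: rest =>
    let r := pvDims (c * p.1) rest
    if p.2 then ((p.1, c) :: r.1, r.2) else (r.1, (p.1, c) :: r.2)

-- decode-based offset of a linear index (proof-only abstraction of A's arithmetic)
def pvB_offset (index : Int) (dims : List (Int × Int)) : Int :=
  (dims.foldl (fun (st : Int × Int) d =>
    (PySem.Int.floordiv st.1 d.1, st.2 + PySem.Int.mod st.1 d.1 * d.2)) (index, 0)).2

-- offsets of all indices in index order, by Cartesian expansion (abstraction of B)
def pvExp : List (Int × Int) → List Int
  | [] => [0]
  | d :: rest => (pvExp rest).flatMap (fun e => (PySem.List.pyRange 0 d.1 1).map (fun j => j * d.2 + e))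

theorem pvPrefixes_getLastD (ss : List Int) (c x : Int) :
    (pvPrefixes c ss).getLastD x = c * ss.prod := by
  induction ss generalizing c x with
  | nil => simp [pvPrefixes]
  | cons s ss ih => rw [pvPrefixes, List.getLastD_cons, ih, List.prod_cons]; ring

theorem pvPrefixes_scale (ss : List Int) (c d : Int) :
    pvPrefixes (c * d) ss = (pvPrefixes d ss).map (fun x => c * x) := by
  induction ss generalizing d with
  | nil => simp [pvPrefixes]
  | cons s ss ih =>
    simp only [pvPrefixes, List.map_cons, List.cons.injEq]
    refine ⟨trivial, ?_⟩
    rw [mul_assoc]; exact ih (d * s)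

theorem pvB_dims_foldl (zs : List (Int × Bool)) (l1 l2 : List (Int × Int)) (c : Int) :
    (zs.foldl (fun (st : List (Int × Int) × List (Int × Int) × Int) p =>
      if p.2 then (st.1 ++ [(p.1, st.2.2)], st.2.1, st.2.2 * p.1)
      else (st.1, st.2.1 ++ [(p.1, st.2.2)], st.2.2 * p.1)) (l1, l2, c))
    = (l1 ++ (pvDims c zs).1, l2 ++ (pvDims c zs).2, c * (zs.map (fun p => p.1)).prod) := by
  induction zs generalizing l1 l2 c with
  | nil => simp [pvDims]
  | cons p rest ih =>
    cases hp : p.2 <;>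
      simp [pvDims, hp, ih, mul_assoc]

theorem pvShape_masked (zs : List (Int × Bool)) (c : Int) :
    ((zs.filter (fun p => p.2)).map (fun p => p.1)) = (pvDims c zs).1.map (fun d => d.1) := by
  induction zs generalizing c with
  | nil => simp [pvDims]
  | cons p rest ih =>
    cases hp : p.2 <;> simp [pvDims, hp, ih (c * p.1)]

theorem pvStride_masked (ps : List Int) (mask : List Bool) (c : Int)
    (h : mask.length = ps.length) :
    (((pvPrefixes c ps).zip mask).filter (fun p => p.2)).map (fun p => p.1)
      = (pvDims c (ps.zip mask)).1.map (fun d => d.2) := by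
  induction ps generalizing mask c with
  | nil =>
    have : mask = [] := List.length_eq_zero_iff.mp (by simpa using h)
    simp [this, pvPrefixes, pvDims]
  | cons s ps ih =>
    cases mask with
    | nil => simp at h
    | cons m ms =>
      cases hm : m <;>
        simp [pvPrefixes, pvDims, ih ms (c * s) (by simpa using h)]

theorem pvShape_unmasked (zs : List (Int × Bool)) (c : Int) :
    ((zs.filter (fun p => !p.2)).map (fun p => p.1)) = (pvDims c zs).2.map (fun d => d.1) := by
  induction zs generalizing c with
  | nil => simp [pvDims]
  | cons p rest ih =>
    cases hp : p.2 <;> simp [pvDims, hp, ih (c * p.1)]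

theorem pvStride_unmasked (ps : List Int) (mask : List Bool) (c : Int)
    (h : mask.length = ps.length) :
    (((pvPrefixes c ps).zip mask).filter (fun p => !p.2)).map (fun p => p.1)
      = (pvDims c (ps.zip mask)).2.map (fun d => d.2) := by
  induction ps generalizing mask c with
  | nil =>
    have hm0 : mask = [] := List.length_eq_zero_iff.mp (by simpa using h)
    simp [hm0, pvPrefixes, pvDims]
  | cons s ps ih =>
    cases mask with
    | nil => simp at h
    | cons m ms =>
      cases hm : m <;>
        simp [pvPrefixes, pvDims, ih ms (c * s) (by simpa using h)]

theorem pvDims_mem_fst {zs : List (Int × Bool)} {c : Int} {d : Int × Int}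
    (h : d ∈ (pvDims c zs).1 ∨ d ∈ (pvDims c zs).2) : d.1 ∈ zs.map (fun p => p.1) := by
  induction zs generalizing c with
  | nil => simp [pvDims] at h
  | cons p rest ih =>
    simp only [List.map_cons, List.mem_cons]
    by_cases hp : p.2 = true
    · simp [pvDims, hp] at h
      rcases h with h1 | h1
      · rcases h1 with h2 | h2
        · left; simp [h2]
        · right; exact ih (c := c * p.1) (Or.inl h2)
      · right; exact ih (c := c * p.1) (Or.inr h1)
    · simp [pvDims, hp] at h
      rcases h with h1 | h1
      · right; exact ih (c := c * p.1) (Or.inl h1)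
      · rcases h1 with h2 | h2
        · left; simp [h2]
        · right; exact ih (c := c * p.1) (Or.inr h2)

theorem pv_fdiv_fdiv (i a b : Int) (ha : 0 < a) (hb : 0 < b) :
    PySem.Int.floordiv (PySem.Int.floordiv i a) b = PySem.Int.floordiv i (a * b) := by
  have h1 := PySem.Int.floordiv_mul_add_mod i a
  have h2 := PySem.Int.floordiv_mul_add_mod (PySem.Int.floordiv i a) b
  have m1a := PySem.Int.mod_nonneg i ha
  have m1b := PySem.Int.mod_lt i ha
  have m2a := PySem.Int.mod_nonneg (PySem.Int.floordiv i a) hb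
  have m2b := PySem.Int.mod_lt (PySem.Int.floordiv i a) hb
  rw [eq_comm, PySem.Int.floordiv_eq_iff_of_pos (by positivity)]
  constructor
  · nlinarith
  · nlinarith

def pvDigits : Int → List Int → List Int
  | _, [] => []
  | i, s :: ss => PySem.Int.mod i s :: pvDigits (PySem.Int.floordiv i s) ss

theorem pv_floordiv_one (i : Int) : PySem.Int.floordiv i 1 = i := by
  rw [PySem.Int.floordiv_eq_ediv_of_pos one_pos, Int.ediv_one]

theorem pvDigits_eq (ss : List Int) (i c : Int) (hc : 0 < c) (hs : ∀ s ∈ ss, 1 ≤ s) :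
    ((ss.zip (pvPrefixes c ss)).map (fun sd => PySem.Int.mod (PySem.Int.floordiv i sd.2) sd.1))
      = pvDigits (PySem.Int.floordiv i c) ss := by
  induction ss generalizing c with
  | nil => simp [pvPrefixes, pvDigits]
  | cons s ss ih =>
    have hs1 : (1:Int) ≤ s := hs s (List.mem_cons_self ..)
    simp only [pvPrefixes, List.zip_cons_cons, List.map_cons, pvDigits, List.cons.injEq]
    refine ⟨trivial, ?_⟩
    rw [ih (c * s) (by nlinarith) (fun x hx => hs x (List.mem_cons_of_mem _ hx)),
      ← pv_fdiv_fdiv i c s hc (by omega)]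

theorem pvPrefixes_ne_nil (init : Int) (ss : List Int) : pvPrefixes init ss ≠ [] := by
  cases ss <;> simp [pvPrefixes]

theorem pv_inner_scale (xs ys : List Int) (c : Int) :
    pvA_inner_product xs (ys.map (fun y => c * y)) = c * pvA_inner_product xs ys := by
  induction xs generalizing ys with
  | nil => simp [pvA_inner_product]
  | cons x xs ih =>
    cases ys with
    | nil => simp [pvA_inner_product]
    | cons y ys =>
      simp only [pvA_inner_product, List.map_cons, List.zip_cons_cons, List.sum_cons] at *
      rw [ih ys]; ring

theorem pvRecon (ss : List Int) (i : Int) (hs : ∀ s ∈ ss, 1 ≤ s) (h0 : 0 ≤ i)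
    (hlt : i < ss.prod) :
    pvA_inner_product (pvDigits i ss) ((pvPrefixes 1 ss).dropLast) = i := by
  induction ss generalizing i with
  | nil =>
    simp [List.prod_nil] at hlt
    simp [pvDigits, pvPrefixes, pvA_inner_product]
    omega
  | cons s ss ih =>
    have hs1 : (1:Int) ≤ s := hs s (List.mem_cons_self ..)
    have hspos : (0:Int) < s := by omega
    have hrec := PySem.Int.floordiv_mul_add_mod i s
    have hq0 : 0 ≤ PySem.Int.floordiv i s :=
      (PySem.Int.le_floordiv_iff_mul_le hspos).mpr (by simpa using h0)
    have hqlt : PySem.Int.floordiv i s < ss.prod := by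
      rw [PySem.Int.floordiv_lt_iff_lt_mul hspos]
      rw [List.prod_cons] at hlt
      nlinarith [hlt]
    have hscale : pvPrefixes s ss = (pvPrefixes 1 ss).map (fun x => s * x) := by
      have h' := pvPrefixes_scale ss s 1
      rwa [mul_one] at h'
    rw [pvDigits, pvPrefixes, one_mul, List.dropLast_cons_of_ne_nil (pvPrefixes_ne_nil s ss)]
    simp only [pvA_inner_product, List.zip_cons_cons, List.map_cons, List.sum_cons]
    rw [show (((pvDigits (PySem.Int.floordiv i s) ss).zip (pvPrefixes s ss).dropLast).map
        (fun p => p.1 * p.2)).sum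
      = pvA_inner_product (pvDigits (PySem.Int.floordiv i s) ss) ((pvPrefixes s ss).dropLast)
      from rfl]
    rw [hscale, ← List.map_dropLast, pv_inner_scale,
      ih _ (fun x hx => hs x (List.mem_cons_of_mem _ hx)) hq0 hqlt]
    linarith

theorem pvB_offset_foldl (dims : List (Int × Int)) (i acc : Int) :
    (dims.foldl (fun (st : Int × Int) d =>
      (PySem.Int.floordiv st.1 d.1, st.2 + PySem.Int.mod st.1 d.1 * d.2)) (i, acc)).2
    = acc + pvB_offset i dims := by
  induction dims generalizing i acc with
  | nil => simp [pvB_offset]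
  | cons d rest ih =>
    simp only [pvB_offset, List.foldl_cons] at *
    rw [ih, ih (PySem.Int.floordiv i d.1) (0 + PySem.Int.mod i d.1 * d.2)]
    ring

theorem pvB_offset_cons (i : Int) (s t : Int) (rest : List (Int × Int)) :
    pvB_offset i ((s, t) :: rest)
      = PySem.Int.mod i s * t + pvB_offset (PySem.Int.floordiv i s) rest := by
  simp only [pvB_offset, List.foldl_cons]
  rw [pvB_offset_foldl]
  simp [pvB_offset]

theorem pvB_offset_eq (ss ts : List Int) (i : Int) :
    pvB_offset i (ss.zip ts) = pvA_inner_product (pvDigits i ss) ts := by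
  induction ss generalizing ts i with
  | nil => simp [pvB_offset, pvDigits, pvA_inner_product]
  | cons s ss ih =>
    cases ts with
    | nil => simp [pvB_offset, pvDigits, pvA_inner_product]
    | cons t ts =>
      simp only [List.zip_cons_cons, pvB_offset_cons, pvDigits, pvA_inner_product,
        List.map_cons, List.sum_cons]
      rw [ih]
      rfl

theorem pv_foldl_append_map {α β : Type} (l : List α) (f : α → β) (acc : List β) :
    l.foldl (fun a x => a ++ [f x]) acc = acc ++ l.map f := by
  induction l generalizing acc with
  | nil => simp
  | cons x xs ih => simp [ih]

theorem pv_foldl_mul (l : List (Int × Int)) (c : Int) :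
    l.foldl (fun a d => a * d.1) c = c * (l.map (fun d => d.1)).prod := by
  induction l generalizing c with
  | nil => simp
  | cons d rest ih => simp [ih, mul_assoc]

theorem pvPrefixes_head_tail (ss : List Int) (c : Int) :
    c :: (pvPrefixes c ss).tail = pvPrefixes c ss := by
  cases ss <;> simp [pvPrefixes]

theorem pvA_prefix_product_foldl (a : List Int) (l : List Int) (c : Int) :
    (a.foldl (fun (st : List Int × Int) v => (st.1 ++ [st.2 * v], st.2 * v)) (l, c)).1
      = l ++ (pvPrefixes c a).tail := by
  induction a generalizing l c with
  | nil => simp [pvPrefixes]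
  | cons v vs ih => simp [pvPrefixes, ih (l ++ [c * v]) (c * v), pvPrefixes_head_tail]

theorem pvA_prefix_product_eq (a : List Int) (init : Int) :
    pvA_prefix_product a init = pvPrefixes init a := by
  rw [pvA_prefix_product, pvA_prefix_product_foldl, ← pvPrefixes_head_tail a init]
  rfl

theorem pvA_decompose_eq (ss : List Int) (i : Int) (hs : ∀ s ∈ ss, 1 ≤ s) (h0 : 0 ≤ i)
    (hlt : i < ss.prod) : pvA_decompose i ss = pvDigits i ss := by
  rw [pvA_decompose]
  simp only [pvA_prefix_product_eq]
  rw [show ((ss.zip (pvPrefixes 1 ss)).map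
      (fun sd => PySem.Int.mod (PySem.Int.floordiv i sd.2) sd.1)) = pvDigits i ss by
    rw [pvDigits_eq ss i 1 one_pos hs, pv_floordiv_one]]
  rw [show (((pvDigits i ss).zip (pvPrefixes 1 ss).dropLast).map (fun p => p.1 * p.2)).sum
      = pvA_inner_product (pvDigits i ss) ((pvPrefixes 1 ss).dropLast) from rfl]
  rw [pvRecon ss i hs h0 hlt]
  simp

theorem pvB_dims_eq (ps : List Int) (mask : List Bool) :
    pvB_dims ps mask = ((pvDims 1 (ps.zip mask)).1, (pvDims 1 (ps.zip mask)).2,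
      ((ps.zip mask).map (fun p => p.1)).prod) := by
  rw [pvB_dims, pvB_dims_foldl]
  simp

theorem pv_zip_fst_snd {α β : Type} (l : List (α × β)) :
    (l.map (fun d => d.1)).zip (l.map (fun d => d.2)) = l := by
  induction l with
  | nil => rfl
  | cons d rest ih => simp [ih]

theorem pv_sizes_pos (ps : List Int) (mask : List Bool) (hall : ∀ s ∈ ps, 1 ≤ s) :
    (∀ s ∈ (pvDims 1 (ps.zip mask)).1.map (fun d => d.1), 1 ≤ s) ∧
    (∀ s ∈ (pvDims 1 (ps.zip mask)).2.map (fun d => d.1), 1 ≤ s) := by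
  constructor <;> intro s hsmem <;>
  · obtain ⟨d, hd, rfl⟩ := List.mem_map.mp hsmem
    first
      | have hz := pvDims_mem_fst (zs := ps.zip mask) (c := 1) (Or.inl hd)
      | have hz := pvDims_mem_fst (zs := ps.zip mask) (c := 1) (Or.inr hd)
    obtain ⟨p, hp, he⟩ := List.mem_map.mp hz
    rw [← he]
    exact hall _ (List.of_mem_zip hp).1

-- truncation identities: List.take n commutes with one expansion level and with the fold
theorem pv_take_append_take (xs ys : List Int) (n : Nat) :
    ((xs.take n) ++ ys).take n = (xs ++ ys).take n := by
  rw [List.take_append, List.take_append, List.take_take, List.length_take]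
  have h : n - min n xs.length = n - xs.length := by omega
  rw [h, Nat.min_self]

theorem pv_take_append_take_right (xs ys : List Int) (n : Nat) :
    (xs ++ ys.take n).take n = (xs ++ ys).take n := by
  rw [List.take_append, List.take_append, List.take_take]
  simp

theorem pv_flatMap_take (js : List Int) (offs : List Int) (f : Int → Int → Int) (n : Nat) :
    (js.flatMap (fun j => (offs.take n).map (f j))).take n
      = (js.flatMap (fun j => offs.map (f j))).take n := by
  induction js with
  | nil => rfl
  | cons j js ih =>
    rw [List.flatMap_cons, List.flatMap_cons, List.map_take, pv_take_append_take,
      ← pv_take_append_take_right (offs.map (f j)), ih, pv_take_append_take_right]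

theorem pv_level_take (offs : List Int) (d : Int × Int) (n : Nat) :
    (pvB_level (offs.take n) d).take n = (pvB_level offs d).take n := by
  simp only [pvB_level]
  exact pv_flatMap_take _ _ _ n

theorem pv_foldl_level_take (dims : List (Int × Int)) (L : List Int) (n : Nat) :
    dims.foldl (fun offs d => (pvB_level offs d).take n) (L.take n)
      = (dims.foldl pvB_level L).take n := by
  induction dims generalizing L with
  | nil => rfl
  | cons d rest ih =>
    rw [List.foldl_cons, List.foldl_cons, pv_level_take]
    exact ih (pvB_level L d)

theorem pv_take_pyRange (P nn : Int) (h0 : 0 ≤ nn) (hle : nn ≤ P) :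
    (PySem.List.pyRange 0 P 1).take nn.toNat = PySem.List.pyRange 0 nn 1 := by
  rw [PySem.List.pyRange_one, PySem.List.pyRange_one, ← List.map_take, List.take_range]
  have h : min nn.toNat (P - 0).toNat = (nn - 0).toNat := by omega
  rw [h]

-- folding pvB_level over dims from any seed list = Cartesian product with pvExp
theorem pv_foldl_level (dims : List (Int × Int)) (L : List Int) :
    dims.foldl pvB_level L = (pvExp dims).flatMap (fun e => L.map (fun o => o + e)) := by
  induction dims generalizing L with
  | nil => simp [pvExp]
  | cons d rest ih =>
    rw [List.foldl_cons, ih]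
    simp only [pvExp, List.flatMap_assoc, List.flatMap_map, pvB_level, List.map_flatMap,
      List.map_map, Function.comp_def, add_assoc]

-- splitting range(0, P*s) into P blocks of s
theorem pv_range_mul_split (P s : Int) (hP : 0 ≤ P) (hs : 0 < s) :
    PySem.List.pyRange 0 (P * s) 1
      = (PySem.List.pyRange 0 P 1).flatMap
          (fun q => (PySem.List.pyRange 0 s 1).map (fun j => q * s + j)) := by
  obtain ⟨n, rfl⟩ := Int.eq_ofNat_of_zero_le hP
  induction n with
  | zero => simp
  | succ n ih =>
    have hcast : ((n + 1 : ℕ) : Int) = (n : Int) + 1 := by push_cast; ring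
    rw [hcast, PySem.List.pyRange_one_succ_right (by positivity), List.flatMap_append]
    have ih' := ih (by positivity)
    have hsplit : PySem.List.pyRange 0 (((n : Int) + 1) * s) 1
        = PySem.List.pyRange 0 ((n : Int) * s) 1
          ++ PySem.List.pyRange ((n : Int) * s) (((n : Int) + 1) * s) 1 :=
      PySem.List.pyRange_one_append 0 ((n : Int) * s) (((n : Int) + 1) * s)
        (by positivity) (by nlinarith)
    rw [hsplit, ← ih']
    congr 1
    rw [PySem.List.pyRange_one ((n : Int) * s) (((n : Int) + 1) * s),
      PySem.List.pyRange_one 0 s]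
    have h2 : (((n : Int) + 1) * s - (n : Int) * s) = s := by ring
    rw [h2]
    simp [List.map_map, Function.comp_def]

theorem pv_fdiv_base (q s j : Int) (hs : 0 < s) (h0 : 0 ≤ j) (hj : j < s) :
    PySem.Int.floordiv (q * s + j) s = q := by
  rw [PySem.Int.floordiv_eq_iff_of_pos hs]
  constructor <;> nlinarith

theorem pv_mod_base (q s j : Int) (hs : 0 < s) (h0 : 0 ≤ j) (hj : j < s) :
    PySem.Int.mod (q * s + j) s = j := by
  have h := PySem.Int.floordiv_mul_add_mod (q * s + j) s
  rw [pv_fdiv_base q s j hs h0 hj] at h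
  linarith

-- the expansion enumerates exactly the decoded offsets of 0..prod-1, in order
theorem pvExp_eq (dims : List (Int × Int)) (hs : ∀ d ∈ dims, 1 ≤ d.1) :
    pvExp dims = (PySem.List.pyRange 0 ((dims.map (fun d => d.1)).prod) 1).map
      (fun i => pvB_offset i dims) := by
  induction dims with
  | nil =>
    rw [show ((([] : List (Int × Int)).map (fun d => d.1)).prod) = 1 by simp,
      show PySem.List.pyRange 0 1 1 = [0] from PySem.List.pyRange_one_singleton 0]
    simp [pvExp, pvB_offset]
  | cons d rest ih =>
    have hd1 : (1:Int) ≤ d.1 := hs d (List.mem_cons_self ..)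
    have hrest : ∀ x ∈ rest, 1 ≤ x.1 := fun x hx => hs x (List.mem_cons_of_mem _ hx)
    have hP : (0:Int) ≤ (rest.map (fun d => d.1)).prod := by
      refine le_of_lt (List.prod_pos ?_)
      intro x hx
      obtain ⟨y, hy, rfl⟩ := List.mem_map.mp hx
      exact lt_of_lt_of_le one_pos (hrest y hy)
    rw [show ((d :: rest).map (fun d => d.1)).prod = (rest.map (fun d => d.1)).prod * d.1 by
      simp [mul_comm]]
    rw [pv_range_mul_split _ d.1 hP (by omega), List.map_flatMap]
    rw [pvExp, ih hrest, List.flatMap_map]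
    apply List.flatMap_congr
    intro q hq
    obtain ⟨hq0, hqP⟩ := PySem.List.mem_pyRange_one.mp hq
    simp only [Function.comp_def, List.map_map]
    apply List.map_congr_left
    intro j hj
    obtain ⟨hj0, hjs⟩ := PySem.List.mem_pyRange_one.mp hj
    have hcons : pvB_offset (q * d.1 + j) ((d.1, d.2) :: rest)
        = PySem.Int.mod (q * d.1 + j) d.1 * d.2
          + pvB_offset (PySem.Int.floordiv (q * d.1 + j) d.1) rest :=
      pvB_offset_cons (q * d.1 + j) d.1 d.2 rest
    rw [show (d : Int × Int) = (d.1, d.2) from rfl] at *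
    rw [hcons, pv_mod_base q d.1 j (by omega) hj0 hjs, pv_fdiv_base q d.1 j (by omega) hj0 hjs]

theorem pv_flatMap_zero (L : List Int) :
    L.flatMap (fun e => [(0:Int)].map (fun o => o + e)) = L := by
  simp

theorem pv_take_singleton (n : Nat) (h : 1 ≤ n) (x : Int) : [x].take n = [x] := by
  cases n with
  | zero => omega
  | succ m => simp

-- ===== VERDICT (by name: the statement is the Claim_ definition above) =====
theorem generate_masked_orthogonal_rank_groups_spec : Claim_equal_generate_masked_orthogonal_rank_groups := by
  intro ws ps mask _ hpre
  unfold Spec_generate_masked_orthogonal_rank_groups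
  obtain ⟨hpm, hcase⟩ := hpre
  simp only [generate_masked_orthogonal_rank_groups, generate_masked_orthogonal_rank_groups_alt,
    pvB_dims_eq, pvA_prefix_product_eq, pvPrefixes_getLastD, pv_foldl_mul, one_mul]
  have hprodEq : pvMaskedProd ps mask = ((pvDims 1 (ps.zip mask)).1.map (fun d => d.1)).prod := by
    rw [pvMaskedProd, pvShape_masked (ps.zip mask) 1]
  by_cases hle : PySem.Int.floordiv ws ((pvDims 1 (ps.zip mask)).1.map (fun d => d.1)).prod ≤ 0
  · -- no group is generated: both programs return []
    rw [if_pos hle]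
    rw [← pvShape_masked (ps.zip mask) 1] at hle
    have hnil : PySem.List.pyRange 0 (PySem.Int.floordiv ws
        (((ps.zip mask).filter (fun p => p.2)).map (fun p => p.1)).prod) 1 = [] :=
      PySem.List.pyRange_one_eq_nil hle
    rw [hnil]
    simp
  · -- at least one group: Pre_'s main conjunct holds
    rw [not_le] at hle
    rw [if_neg (by omega)]
    rcases hcase with htriv | ⟨hlen, hall, hN⟩
    · rw [hprodEq] at htriv; omega
    obtain ⟨hMpos, hUpos⟩ := pv_sizes_pos ps mask hall
    -- abbreviations
    have hGS0 : (0:Int) < ((pvDims 1 (ps.zip mask)).1.map (fun d => d.1)).prod := by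
      refine List.prod_pos ?_
      intro x hx
      exact lt_of_lt_of_le one_pos (hMpos x hx)
    have hdimsM : ∀ d ∈ (pvDims 1 (ps.zip mask)).1, 1 ≤ d.1 := by
      intro d hd
      exact hMpos d.1 (List.mem_map_of_mem hd)
    have hdimsU : ∀ d ∈ (pvDims 1 (ps.zip mask)).2, 1 ≤ d.1 := by
      intro d hd
      exact hUpos d.1 (List.mem_map_of_mem hd)
    have hNle : PySem.Int.floordiv ws ((pvDims 1 (ps.zip mask)).1.map (fun d => d.1)).prod
        ≤ ((pvDims 1 (ps.zip mask)).2.map (fun d => d.1)).prod := by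
      have h2 : pvUnmaskedProd ps mask = ((pvDims 1 (ps.zip mask)).2.map (fun d => d.1)).prod := by
        rw [pvUnmaskedProd, pvShape_unmasked (ps.zip mask) 1]
      rw [hprodEq, h2] at hN
      exact hN
    -- B's rank offsets: full expansion of the masked dims
    have hrank : (pvDims 1 (ps.zip mask)).1.foldl pvB_level [0]
        = (PySem.List.pyRange 0 (((pvDims 1 (ps.zip mask)).1.map (fun d => d.1)).prod) 1).map
            (fun i => pvB_offset i (pvDims 1 (ps.zip mask)).1) := by
      rw [pv_foldl_level, pv_flatMap_zero, pvExp_eq _ hdimsM]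
    -- B's group offsets: truncated expansion of the unmasked dims
    have hgroup : (pvDims 1 (ps.zip mask)).2.foldl (fun offs d => (pvB_level offs d).take
          (PySem.Int.floordiv ws ((pvDims 1 (ps.zip mask)).1.map (fun d => d.1)).prod).toNat) [0]
        = (PySem.List.pyRange 0 (PySem.Int.floordiv ws
            ((pvDims 1 (ps.zip mask)).1.map (fun d => d.1)).prod) 1).map
            (fun i => pvB_offset i (pvDims 1 (ps.zip mask)).2) := by
      have h1 : (1:Nat) ≤ (PySem.Int.floordiv ws
          ((pvDims 1 (ps.zip mask)).1.map (fun d => d.1)).prod).toNat := by omega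
      rw [show ([0] : List Int) = [0].take (PySem.Int.floordiv ws
          ((pvDims 1 (ps.zip mask)).1.map (fun d => d.1)).prod).toNat from
        (pv_take_singleton _ h1 0).symm]
      rw [pv_foldl_level_take, pv_foldl_level, pv_flatMap_zero, pvExp_eq _ hdimsU,
        ← List.map_take, pv_take_pyRange _ _ (by omega) hNle]
    rw [hrank, hgroup]
    rw [pvStride_masked ps mask 1 hlen, pvStride_unmasked ps mask 1 hlen,
      pvShape_masked (ps.zip mask) 1, pvShape_unmasked (ps.zip mask) 1]
    simp only [pv_foldl_append_map, List.nil_append, List.map_map]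
    apply List.map_congr_left
    intro gi hgi
    obtain ⟨hgi0, hgiN⟩ := PySem.List.mem_pyRange_one.mp hgi
    simp only [Function.comp_apply]
    apply List.map_congr_left
    intro r hr
    obtain ⟨hr0, hrG⟩ := PySem.List.mem_pyRange_one.mp hr
    rw [pvA_decompose_eq _ r hMpos hr0 hrG,
      pvA_decompose_eq _ gi hUpos hgi0 (lt_of_lt_of_le hgiN hNle),
      ← pvB_offset_eq, ← pvB_offset_eq, pv_zip_fst_snd, pv_zip_fst_snd]
    simp only [Function.comp_apply]
    ring
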